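-- pv_equiv track=rewrite | github.com/edoardottt/offensive-onos | onos-dm/gendata2.py | generate_cap
-- ===== SOURCE A (Python) =====
-- import itertools
--
-- tab = "	"
--
-- items = {
--     "org.onosproject.fwd getHost": "1",
--     "org.onosproject.fwd forward": "2",
--     "org.edoardottt.malhosttracking.app appendLocation": "3",
--     "org.edoardottt.malhosttracking.app removeLocation": "4",
-- }
--
-- def is_attack(stringa):
--     if "3" in stringa:
--         index3 = stringa.index("3")
--         if "2" in stringa and stringa.index("2", index3, len(stringa) - 1):
--             return True
--
--     if "4" in stringa:
--         index4 = stringa.index("4")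
--         if "2" in stringa and stringa.index("2", index4, len(stringa) - 1):
--             return True
--
--     return False
--
-- def generate_cap(limit):
--     result = [i for i in range(limit + 1)]
--
--     temp = []
--     temp += [p for p in itertools.product(items.values(), repeat=10)]
--     for i in range(len(temp)):
--         temp[i] += temp[i] + temp[i] + temp[i] + temp[i]
--         if is_attack(temp[i]):
--             temp[i] += (tab + "1",)
--         else:
--             temp[i] += (tab + "0",)
--     for i in range(len(temp)):
--         result[i] = temp[i]
--         if i >= limit:
--             break
--
--     return result
-- ===== SOURCE B (Python) =====
-- tab = "	"
--
-- items = {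
--     "org.onosproject.fwd getHost": "1",
--     "org.onosproject.fwd forward": "2",
--     "org.edoardottt.malhosttracking.app appendLocation": "3",
--     "org.edoardottt.malhosttracking.app removeLocation": "4",
-- }
--
-- def is_attack(stringa):
--     if "3" in stringa:
--         index3 = stringa.index("3")
--         if "2" in stringa and stringa.index("2", index3, len(stringa) - 1):
--             return True
--
--     if "4" in stringa:
--         index4 = stringa.index("4")
--         if "2" in stringa and stringa.index("2", index4, len(stringa) - 1):
--             return True
--
--     return False
--
-- def generate_cap(limit):
--     # Decode each row ordinal into its base-4 digit tuple directly instead of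
--     # materialising the whole 4**10 cartesian product.
--     vals = list(items.values())
--     result = []
--     for n in range(limit + 1):
--         t, x = (), n
--         for _ in range(10):
--             t = (vals[x % 4],) + t
--             x //= 4
--         full = t * 5
--         full += (tab + ("1" if is_attack(full) else "0"),)
--         result.append(full)
--     return result
-- ===== Notes on version B (the rewrite author's own statement) =====
-- stated objective: faster
-- what changed: B decodes each of the first limit+1 row ordinals into its 10-symbol base-4 tuple directly (last digit varies fastest, matching itertools.product order) instead of materialising and transforming the entire 4**10-element cartesian product.
-- outside the precondition, e.g. on generate_cap(-1): A raises IndexError, B returns []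
import Mathlib
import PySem

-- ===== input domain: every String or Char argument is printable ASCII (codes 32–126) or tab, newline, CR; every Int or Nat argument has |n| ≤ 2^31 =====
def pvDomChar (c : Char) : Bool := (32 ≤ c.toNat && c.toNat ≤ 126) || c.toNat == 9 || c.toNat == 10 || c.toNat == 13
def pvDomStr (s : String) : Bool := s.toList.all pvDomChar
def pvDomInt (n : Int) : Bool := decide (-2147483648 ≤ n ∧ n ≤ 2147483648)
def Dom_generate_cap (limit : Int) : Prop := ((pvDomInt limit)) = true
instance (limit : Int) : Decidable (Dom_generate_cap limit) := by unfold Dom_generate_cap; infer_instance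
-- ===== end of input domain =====

-- B replaces A's materialisation of the whole 4^10-element itertools.product with a direct
-- base-4 decoding of each of the first limit+1 row ordinals (objective: faster).

-- ===== PORT A =====

def pvTab : String := "\t"

-- the module-level dict 'items'
def pvItems : PySem.Dict String String := PySem.Dict.mk
  [("org.onosproject.fwd getHost", "1"),
   ("org.onosproject.fwd forward", "2"),
   ("org.edoardottt.malhosttracking.app appendLocation", "3"),
   ("org.edoardottt.malhosttracking.app removeLocation", "4")]

-- s.index(v, start, stop): first index of v in s restricted to [start, stop); none = ValueError
def pvIndexIn (s : List String) (v : String) (start stop : Nat) : Option Nat :=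
  (((s.take stop).drop start).idxOf? v).map (· + start)

-- helper is_attack, shared by both Pythons (B keeps it verbatim); the tuple argument is a
-- List String.  'stringa.index(...)' is truthy iff the found index is nonzero; the none
-- branch is where Python would raise ValueError (never reached on the rows generate_cap builds).
def is_attack (s : List String) : Bool :=
  (if s.contains "3" then
     (s.contains "2" &&
       (match pvIndexIn s "2" (s.idxOf "3") (s.length - 1) with
        | some k => decide (k ≠ 0)
        | none => false))
   else false)
  ||
  (if s.contains "4" then
     (s.contains "2" &&
       (match pvIndexIn s "2" (s.idxOf "4") (s.length - 1) with
        | some k => decide (k ≠ 0)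
        | none => false))
   else false)

-- the copy loop 'for i in range(len(temp)): result[i] = temp[i]; if i >= limit: break'.
-- result[i] = temp[i] out of range is Python's IndexError; List.set's no-op there is
-- excluded by Pre_ (limit ≥ 0 keeps every reached i in range).
def pvCopyLoop (temp : List (List String)) (limit : Int) : Nat → List (List String) → List (List String)
  | i, result =>
    if h : i < temp.length then
      let result' := result.set i temp[i]
      if limit ≤ (i : Int) then result' else pvCopyLoop temp limit (i + 1) result'
    else result
  termination_by i => temp.length - i

def generate_cap (limit : Int) : List (List String) :=
  -- result = [i for i in range(limit + 1)]: the int placeholders cannot inhabit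
  -- List (List String); they are modelled as [] and (under Pre_) all overwritten below.
  let result : List (List String) := (PySem.List.pyRange 0 (limit + 1) 1).map (fun _ => [])
  -- temp = [p for p in itertools.product(items.values(), repeat=10)], built by product's
  -- standard counting recurrence (leftmost slot varies slowest)
  let temp : List (List String) :=
    (List.range 10).foldl
      (fun acc _ => acc.flatMap (fun r => pvItems.values.map (fun s => r ++ [s]))) [[]]
  -- the in-place transformation loop over temp
  let temp := temp.map (fun t =>
    let t := t ++ (t ++ t ++ t ++ t)
    if is_attack t then t ++ [pvTab ++ "1"] else t ++ [pvTab ++ "0"])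
  pvCopyLoop temp limit 0 result

-- ===== PORT B =====

-- the inner 'for _ in range(10): t = (vals[x % 4],) + t; x //= 4' loop; vals[x % 4] is
-- always in range (0 ≤ x % 4 < 4), so the total pyGetD form is exact.
def pvDecodeLoop : Nat → Int → List String → List String
  | 0, _, t => t
  | k + 1, x, t =>
      pvDecodeLoop k (PySem.Int.floordiv x 4)
        ((PySem.List.pyGetD pvItems.values (PySem.Int.mod x 4) "") :: t)

def generate_cap_alt (limit : Int) : List (List String) :=
  (PySem.List.pyRange 0 (limit + 1) 1).map (fun n =>
    let t := pvDecodeLoop 10 n []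
    let full := t ++ t ++ t ++ t ++ t
    full ++ [pvTab ++ (if is_attack full then "1" else "0")])

-- ===== PRECONDITION & SPEC =====

-- Pre_ excludes limit < 0, where A raises IndexError (result is empty when temp[0] is copied),
-- and limit ≥ 4^10, where A returns a list whose trailing elements are the leftover int
-- placeholders — a value outside the declared type List (List String).
def Pre_generate_cap (limit : Int) : Prop := 0 ≤ limit ∧ limit < 1048576
instance (limit : Int) : Decidable (Pre_generate_cap limit) := by unfold Pre_generate_cap; infer_instance

def pvWitness_generate_cap : Int := (2)

def Spec_generate_cap (limit : Int) (out : List (List String)) : Prop := out = generate_cap_alt limit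
instance (limit : Int) (out : List (List String)) : Decidable (Spec_generate_cap limit out) := by unfold Spec_generate_cap; infer_instance

-- ===== CLAIM (what is proved, stated in full; the proofs are below) =====
def Claim_equal_generate_cap : Prop := ∀ (limit : Int), Dom_generate_cap limit → Pre_generate_cap limit → Spec_generate_cap limit (generate_cap limit)

-- ===== LEMMAS AND PROOFS =====

-- prepending accumulator of the decode loop
theorem pvDecodeLoop_append (k : Nat) : ∀ (x : Int) (t : List String),
    pvDecodeLoop k x t = pvDecodeLoop k x [] ++ t := by
  induction k with
  | zero => intro x t; simp [pvDecodeLoop]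
  | succ k ih =>
    intro x t
    rw [pvDecodeLoop, pvDecodeLoop, ih, ih (PySem.Int.floordiv x 4) [_]]
    simp

-- one decoding step: the last base-4 digit comes off
theorem pvDecodeLoop_step (k m d : Nat) (hd : d < 4) :
    pvDecodeLoop (k + 1) ((4 * m + d : Nat) : Int) []
      = pvDecodeLoop k (m : Int) [] ++ [pvItems.values.getD d ""] := by
  rw [pvDecodeLoop, pvDecodeLoop_append]
  have h1 : PySem.Int.floordiv ((4 * m + d : Nat) : Int) 4 = ((m : Nat) : Int) := by
    rw [show ((4:Int)) = ((4:Nat):Int) by norm_num, PySem.Int.floordiv_natCast]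
    congr 1; omega
  have h2 : PySem.Int.mod ((4 * m + d : Nat) : Int) 4 = ((d : Nat) : Int) := by
    rw [show ((4:Int)) = ((4:Nat):Int) by norm_num, PySem.Int.mod_natCast]
    congr 1; omega
  rw [h1, h2, PySem.List.pyGetD_natCast]

-- splitting range (4*n) into blocks of four
theorem map_range_mul4 {α : Type} (f : Nat → α) (n : Nat) :
    (List.range (4 * n)).map f
      = (List.range n).flatMap (fun m => (List.range 4).map (fun d => f (4 * m + d))) := by
  induction n with
  | zero => simp
  | succ n ih =>
    have : 4 * (n + 1) = 4 * n + 4 := by ring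
    rw [this, List.range_add, List.range_succ]
    simp only [List.map_append, List.map_map, ih]
    simp [List.range_succ, Function.comp]

-- the product fold equals index-decoding of every ordinal below 4^k
theorem prod_eq_decode (k : Nat) :
    (List.range k).foldl
        (fun acc _ => acc.flatMap (fun r => pvItems.values.map (fun s => r ++ [s]))) [[]]
      = (List.range (4 ^ k)).map (fun (n : Nat) => pvDecodeLoop k ((n : Int)) []) := by
  induction k with
  | zero => simp [pvDecodeLoop]
  | succ k ih =>
    rw [List.range_succ, List.foldl_append, ih]
    have hpow : 4 ^ (k + 1) = 4 * 4 ^ k := by ring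
    rw [hpow, map_range_mul4]
    simp only [List.foldl_cons, List.foldl_nil, List.flatMap_map]
    apply List.flatMap_congr  -- pointwise over m ∈ range 4^k
    intro m _
    have h4 : (List.range 4) = [0, 1, 2, 3] := by decide
    rw [h4]
    simp only [List.map_cons, List.map_nil]
    rw [pvDecodeLoop_step k m 0 (by omega), pvDecodeLoop_step k m 1 (by omega),
        pvDecodeLoop_step k m 2 (by omega), pvDecodeLoop_step k m 3 (by omega)]
    simp [pvItems, PySem.Dict.values]

-- the copy loop with break overwrites exactly the first limit+1 cells
theorem pvCopyLoop_eq (temp : List (List String)) (limit : Int) (h0 : 0 ≤ limit)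
    (hL : limit.toNat < temp.length) :
    ∀ (n i : Nat) (result : List (List String)),
      limit.toNat - i = n → i ≤ limit.toNat → result.length = limit.toNat + 1 →
      pvCopyLoop temp limit i result
        = result.take i ++ (temp.drop i).take (limit.toNat + 1 - i) := by
  intro n
  induction n with
  | zero =>
    intro i result hn hi hlen
    have hieq : i = limit.toNat := by omega
    have hit : i < temp.length := by omega
    rw [pvCopyLoop]
    rw [dif_pos hit, if_pos (by omega)]
    rw [List.set_eq_take_cons_drop _ (by omega)]
    rw [List.drop_eq_getElem_cons hit]
    have : limit.toNat + 1 - i = 1 := by omega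
    rw [this, List.take_succ_cons, List.take_zero]
    have : result.drop (i + 1) = [] := by
      apply List.drop_eq_nil_of_le; omega
    rw [this]
  | succ n ih =>
    intro i result hn hi hlen
    have hit : i < temp.length := by omega
    rw [pvCopyLoop]
    rw [dif_pos hit, if_neg (by omega)]
    rw [ih (i + 1) _ (by omega) (by omega) (by simp [hlen])]
    rw [List.set_eq_take_cons_drop _ (by omega)]
    rw [List.take_append]
    have hti : (result.take i).length = i := by simp; omega
    rw [hti]
    have : i + 1 - i = 1 := by omega
    rw [this, List.take_take, List.take_succ_cons, List.take_zero]
    rw [List.drop_eq_getElem_cons hit]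
    have : limit.toNat + 1 - i = (limit.toNat + 1 - (i + 1)) + 1 := by omega
    rw [this, List.take_succ_cons]
    simp

-- ===== VERDICT (by name: the statement is the Claim_ definition above) =====
theorem generate_cap_spec : Claim_equal_generate_cap := by
  intro limit _ hpre
  obtain ⟨h0, hlt⟩ := hpre
  unfold Spec_generate_cap generate_cap generate_cap_alt
  set L := limit.toNat with hLdef
  have hlim : (limit : Int) = (L : Int) := by omega
  -- the transformed temp list
  set g : List String → List String := (fun t =>
    let t := t ++ (t ++ t ++ t ++ t)
    if is_attack t then t ++ [pvTab ++ "1"] else t ++ [pvTab ++ "0"]) with hg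
  rw [prod_eq_decode 10]
  set temp := ((List.range (4 ^ 10)).map (fun (n : Nat) => pvDecodeLoop 10 ((n : Int)) [])).map g with htemp
  have htl : temp.length = 4 ^ 10 := by simp [htemp]
  have hLlt : L < 4 ^ 10 := by omega
  -- the placeholder result list has length L + 1
  have hres : ((PySem.List.pyRange 0 (limit + 1) 1).map
      (fun _ => ([] : List String))).length = L + 1 := by
    simp [PySem.List.length_pyRange_one]; omega
  rw [pvCopyLoop_eq temp limit h0 (by omega) (L - 0) 0 _ (by omega) (by omega) hres]
  simp only [List.take_zero, List.nil_append, List.drop_zero]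
  -- A's side is temp.take (L+1)
  rw [htemp, ← List.map_take, ← List.map_take, List.take_range]
  have hmin : min (limit.toNat + 1 - 0) (4 ^ 10) = L + 1 := by omega
  rw [hmin]
  -- B's side over the same range
  rw [PySem.List.pyRange_one]
  have : ((limit + 1) - 0).toNat = L + 1 := by omega
  rw [this, List.map_map, List.map_map]
  apply List.map_congr_left
  intro k _
  simp only [Function.comp, hg, zero_add]
  have hassoc : ∀ d : List String, d ++ (d ++ d ++ d ++ d) = d ++ d ++ d ++ d ++ d := by
    intro d; simp [List.append_assoc]
  rw [hassoc]
  cases h : is_attack (pvDecodeLoop 10 ((k : Nat) : Int) [] ++ pvDecodeLoop 10 ((k : Nat) : Int) [] ++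
      pvDecodeLoop 10 ((k : Nat) : Int) [] ++ pvDecodeLoop 10 ((k : Nat) : Int) [] ++
      pvDecodeLoop 10 ((k : Nat) : Int) [])
  · simp
  · simp
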